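-- pv_equiv track=rewrite | github.com/ThomasZumsteg/adventofcode2015 | day11.py | sequences_of_len_n
-- ===== SOURCE A (Python) =====
-- def sequences_of_len_n(string, n):
--     m = 0
--     i = n
--     while i <= len(string):
--         if len(set(string[i-n:i])) == 1:
--             m += 1
--             i += n - 1
--         i += 1
--     return m
-- ===== SOURCE B (Python) =====
-- def sequences_of_len_n(string, n):
--     total = 0
--     i = 0
--     length = len(string)
--     while i < length:
--         j = i
--         while j < length and string[j] == string[i]:
--             j += 1
--         total += (j - i) // n
--         i = j
--     return total
-- ===== Notes on version B (the rewrite author's own statement) =====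
-- stated objective: faster
-- what changed: Instead of sliding a window and building a set of n characters at every position, B makes one two-pointer pass over maximal runs of identical characters and adds floor(run_length / n) per run.
-- outside the precondition, e.g. on sequences_of_len_n('aa', -1): A does not finish within the time limit, B returns -2; on sequences_of_len_n('ab', -2): A returns 0, B returns -2; on sequences_of_len_n('aa', 0): A returns 0, B raises ZeroDivisionError
import Mathlib
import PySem

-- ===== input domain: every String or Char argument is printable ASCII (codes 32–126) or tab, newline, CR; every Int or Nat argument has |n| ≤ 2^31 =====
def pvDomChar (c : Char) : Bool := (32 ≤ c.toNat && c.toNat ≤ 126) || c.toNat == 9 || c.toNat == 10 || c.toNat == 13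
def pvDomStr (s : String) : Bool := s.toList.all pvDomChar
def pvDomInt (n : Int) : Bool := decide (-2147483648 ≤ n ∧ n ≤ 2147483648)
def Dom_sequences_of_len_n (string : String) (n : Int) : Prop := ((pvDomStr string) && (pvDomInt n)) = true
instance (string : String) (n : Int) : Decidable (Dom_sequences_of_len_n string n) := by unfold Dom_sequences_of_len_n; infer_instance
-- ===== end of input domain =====

-- B replaces A's per-position slice-and-set window test by a single two-pointer
-- pass over maximal runs of identical characters (objective: faster).

-- ===== PORT A =====
-- Python's while loop, ported with fuel; for n ≥ 1 the index strictly increases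
-- each iteration, so fuel `length + 1` is never exhausted on inputs in Pre_.
def aLoop (s : List Char) (n : Int) : Nat → Int → Int → Int
  | 0, _, m => m
  | fuel + 1, i, m =>
    if i ≤ (s.length : Int) then
      if (PySem.Set.ofList (PySem.List.slice s (some (i - n)) (some i))).length = 1 then
        aLoop s n fuel (i + (n - 1) + 1) (m + 1)
      else
        aLoop s n fuel (i + 1) m
    else m

def sequences_of_len_n (string : String) (n : Int) : Int :=
  aLoop string.toList n (string.toList.length + 1) n 0

-- ===== PORT B =====
-- inner `while j < length and string[j] == string[i]` = takeWhile/dropWhile on the rest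
def altGo (n : Int) : List Char → Int
  | [] => 0
  | c :: cs =>
    PySem.Int.floordiv (((cs.takeWhile (fun x => x == c)).length : Int) + 1) n
      + altGo n (cs.dropWhile (fun x => x == c))
termination_by l => l.length
decreasing_by
  exact Nat.lt_succ_of_le (List.length_dropWhile_le _ _)

def sequences_of_len_n_alt (string : String) (n : Int) : Int :=
  altGo n string.toList

-- ===== PRECONDITION & SPEC =====
-- Pre_ excludes n ≤ 0 (a non-positive window size): there A's loop diverges on
-- some inputs (e.g. ('aa', -1)) and on the others returns a count of accidental
-- negative-slice windows, while B floor-divides run lengths by n (ZeroDivisionError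
-- for n = 0, negative totals for n < 0).
def Pre_sequences_of_len_n (string : String) (n : Int) : Prop := 1 ≤ n
instance (string : String) (n : Int) : Decidable (Pre_sequences_of_len_n string n) := by
  unfold Pre_sequences_of_len_n; infer_instance

def pvWitness_sequences_of_len_n : String × Int := ("aabbba", 2)

def Spec_sequences_of_len_n (string : String) (n : Int) (out : Int) : Prop := out = sequences_of_len_n_alt string n
instance (string : String) (n : Int) (out : Int) : Decidable (Spec_sequences_of_len_n string n out) := by unfold Spec_sequences_of_len_n; infer_instance

-- ===== CLAIM (what is proved, stated in full; the proofs are below) =====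
def Claim_equal_sequences_of_len_n : Prop := ∀ (string : String) (n : Int), Dom_sequences_of_len_n string n → Pre_sequences_of_len_n string n → Spec_sequences_of_len_n string n (sequences_of_len_n string n)

-- ===== LEMMAS AND PROOFS =====

-- fuel irrelevance: once fuel bounds the remaining iterations, adding fuel changes nothing
theorem aLoop_fuel_succ (s : List Char) (n : Int) (hn : 1 ≤ n) :
    ∀ (fuel : Nat) (i m : Int), (s.length : Int) < i + fuel →
      aLoop s n fuel i m = aLoop s n (fuel + 1) i m := by
  intro fuel
  induction fuel with
  | zero =>
    intro i m h
    simp only [aLoop]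
    rw [if_neg (by push_cast at h ⊢; omega)]
  | succ fuel ih =>
    intro i m h
    simp only [aLoop]
    split
    · split
      · exact ih _ _ (by push_cast at h ⊢; omega)
      · exact ih _ _ (by push_cast at h ⊢; omega)
    · rfl

theorem aLoop_fuel_add (s : List Char) (n : Int) (hn : 1 ≤ n) :
    ∀ (k fuel : Nat) (i m : Int), (s.length : Int) < i + fuel →
      aLoop s n fuel i m = aLoop s n (fuel + k) i m := by
  intro k
  induction k with
  | zero => intro fuel i m _; rfl
  | succ k ih =>
    intro fuel i m h
    rw [ih fuel i m h]
    exact aLoop_fuel_succ s n hn (fuel + k) i m (by push_cast at h ⊢; omega)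

theorem aLoop_fuel_eq (s : List Char) (n : Int) (hn : 1 ≤ n) :
    ∀ (fuel fuel' : Nat) (i m : Int), (s.length : Int) < i + fuel →
      (s.length : Int) < i + fuel' →
      aLoop s n fuel i m = aLoop s n fuel' i m := by
  intro fuel fuel' i m h h'
  rcases Nat.le_total fuel fuel' with hle | hle
  · obtain ⟨k, rfl⟩ := Nat.exists_eq_add_of_le hle
    exact aLoop_fuel_add s n hn k fuel i m h
  · obtain ⟨k, rfl⟩ := Nat.exists_eq_add_of_le hle
    exact (aLoop_fuel_add s n hn k fuel' i m h').symm

-- the accumulator only ever grows: pull it out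
theorem aLoop_acc (s : List Char) (n : Int) :
    ∀ (fuel : Nat) (i m : Int), aLoop s n fuel i m = m + aLoop s n fuel i 0 := by
  intro fuel
  induction fuel with
  | zero => intro i m; simp [aLoop]
  | succ fuel ih =>
    intro i m
    simp only [aLoop]
    by_cases hle : i ≤ (s.length : Int)
    · rw [if_pos hle, if_pos hle]
      by_cases hC : (PySem.Set.ofList (PySem.List.slice s (some (i - n)) (some i))).length = 1
      · rw [if_pos hC, if_pos hC, ih _ (m + 1), ih _ (0 + 1)]
        ring
      · rw [if_neg hC, if_neg hC, ih _ m]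
    · rw [if_neg hle, if_neg hle]
      ring

-- canonical run with always-sufficient fuel (for 1 ≤ i)
def runA (s : List Char) (n : Int) (i m : Int) : Int :=
  aLoop s n (s.length + 1) i m

theorem runA_step (s : List Char) (n : Int) (hn : 1 ≤ n) (i m : Int) (hi : 1 ≤ i) :
    runA s n i m =
      if i ≤ (s.length : Int) then
        if (PySem.Set.ofList (PySem.List.slice s (some (i - n)) (some i))).length = 1 then
          runA s n (i + n) (m + 1)
        else runA s n (i + 1) m
      else m := by
  have unf : runA s n i m =
      if i ≤ (s.length : Int) then
        if (PySem.Set.ofList (PySem.List.slice s (some (i - n)) (some i))).length = 1 then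
          aLoop s n s.length (i + (n - 1) + 1) (m + 1)
        else aLoop s n s.length (i + 1) m
      else m := rfl
  rw [unf]
  split
  · split
    · rw [show i + (n - 1) + 1 = i + n by ring]
      exact aLoop_fuel_eq s n hn s.length (s.length + 1) (i + n) (m + 1)
        (by omega) (by omega)
    · exact aLoop_fuel_eq s n hn s.length (s.length + 1) (i + 1) m
        (by omega) (by omega)
  · rfl

theorem runA_acc (s : List Char) (n : Int) (i m : Int) :
    runA s n i m = m + runA s n i 0 :=
  aLoop_acc s n _ i m

-- set facts
theorem ofList_replicate_aux (c : Char) :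
    ∀ k : Nat, List.foldl PySem.Set.add [c] (List.replicate k c) = [c] := by
  intro k
  induction k with
  | zero => rfl
  | succ k ih =>
    rw [List.replicate_succ, List.foldl_cons,
        show PySem.Set.add [c] c = [c] by simp [PySem.Set.add, PySem.Set.contains]]
    exact ih

theorem ofList_replicate_one (c : Char) (k : Nat) :
    PySem.Set.ofList (List.replicate (k + 1) c) = [c] := by
  rw [PySem.Set.ofList_eq_foldl, List.replicate_succ, List.foldl_cons,
      show PySem.Set.add [] c = [c] by simp [PySem.Set.add, PySem.Set.contains]]
  exact ofList_replicate_aux c k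

theorem ofList_len_ne_one {l : List Char} {a b : Char}
    (ha : a ∈ l) (hb : b ∈ l) (hne : a ≠ b) :
    (PySem.Set.ofList l).length ≠ 1 := by
  intro h
  obtain ⟨x, hx⟩ := List.length_eq_one_iff.mp h
  have ha' : a ∈ PySem.Set.ofList l := by rw [PySem.Set.mem_ofList]; exact ha
  have hb' : b ∈ PySem.Set.ofList l := by rw [PySem.Set.mem_ofList]; exact hb
  rw [hx, List.mem_singleton] at ha' hb'
  exact hne (ha'.trans hb'.symm)

-- windows fully inside the run are uniform
theorem slice_in_run (L : Nat) (c : Char) (rest : List Char) (a N : Nat)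
    (h : a + N ≤ L) :
    PySem.List.slice (List.replicate L c ++ rest) (some (a : Int)) (some ((a + N : Nat) : Int))
      = List.replicate N c := by
  rw [show ((a + N : Nat) : Int) = (a : Int) + (N : Int) by push_cast; ring,
      PySem.List.slice_natCast_add,
      List.drop_append_of_le_length (by simp; omega),
      List.drop_replicate,
      List.take_append_of_le_length (by simp; omega),
      List.take_replicate]
  congr 1
  omega

-- windows past the run live in `rest`
theorem slice_in_rest (L : Nat) (c : Char) (rest : List Char) (a b : Nat)
    (h : L ≤ a) :
    PySem.List.slice (List.replicate L c ++ rest) (some (a : Int)) (some (b : Int))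
      = PySem.List.slice rest (some ((a - L : Nat) : Int)) (some ((b - L : Nat) : Int)) := by
  rw [PySem.List.slice_natCast, PySem.List.slice_natCast, List.drop_append,
      List.drop_replicate, show L - a = 0 by omega]
  simp only [List.replicate_zero, List.nil_append, List.length_replicate]
  congr 1
  omega

theorem slice_in_rest_int (L : Nat) (c : Char) (rest : List Char) (a b : Int)
    (h0 : 0 ≤ a) (h0b : (L : Int) ≤ b) (h : (L : Int) ≤ a) :
    PySem.List.slice (List.replicate L c ++ rest) (some a) (some b)
      = PySem.List.slice rest (some (a - L)) (some (b - L)) := by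
  obtain ⟨a', rfl⟩ : ∃ a' : Nat, a = (a' : Int) := ⟨a.toNat, by omega⟩
  obtain ⟨b', rfl⟩ : ∃ b' : Nat, b = (b' : Int) := ⟨b.toNat, by omega⟩
  rw [show (a' : Int) - L = ((a' - L : Nat) : Int) by omega,
      show (b' : Int) - L = ((b' - L : Nat) : Int) by omega]
  exact slice_in_rest L c rest a' b' (by omega)

-- windows straddling the boundary contain both c and the first char of rest
theorem slice_mixed (L : Nat) (c d : Char) (rest : List Char) (a b : Nat)
    (hL : 1 ≤ L) (ha : a ≤ L - 1) (hb : L < b) :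
    c ∈ PySem.List.slice (List.replicate L c ++ d :: rest) (some (a : Int)) (some (b : Int)) ∧
    d ∈ PySem.List.slice (List.replicate L c ++ d :: rest) (some (a : Int)) (some (b : Int)) := by
  rw [PySem.List.slice_natCast]
  have hdrop : (List.replicate L c ++ d :: rest).drop a
      = List.replicate (L - a) c ++ d :: rest := by
    rw [List.drop_append_of_le_length (by simp; omega), List.drop_replicate]
  rw [hdrop, List.take_append, List.take_replicate]
  constructor
  · exact List.mem_append_left _ (by rw [List.mem_replicate]; exact ⟨by omega, rfl⟩)
  · refine List.mem_append_right _ ?_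
    rw [show b - a - (List.replicate (L - a) c).length = (b - L - 1) + 1 by
          simp only [List.length_replicate]; omega,
        List.take_succ_cons]
    simp

theorem slice_mixed_int (L : Nat) (c d : Char) (rest : List Char) (a b : Int)
    (h0 : 0 ≤ a) (hL : 1 ≤ L) (ha : a ≤ (L : Int) - 1) (hb : (L : Int) < b) :
    c ∈ PySem.List.slice (List.replicate L c ++ d :: rest) (some a) (some b) ∧
    d ∈ PySem.List.slice (List.replicate L c ++ d :: rest) (some a) (some b) := by
  obtain ⟨a', rfl⟩ : ∃ a' : Nat, a = (a' : Int) := ⟨a.toNat, by omega⟩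
  obtain ⟨b', rfl⟩ : ∃ b' : Nat, b = (b' : Int) := ⟨b.toNat, by omega⟩
  exact slice_mixed L c d rest a' b' hL (by omega) (by omega)

-- once the window is past the run, the loop is the loop on `rest`
theorem runA_shift (L : Nat) (c : Char) (rest : List Char) (n : Int) (hn : 1 ≤ n)
    (hL : 1 ≤ L) :
    ∀ (k : Nat) (i m : Int),
      (((List.replicate L c ++ rest).length : Int) + n - i).toNat ≤ k →
      (L : Int) + n ≤ i →
      runA (List.replicate L c ++ rest) n i m = runA rest n (i - L) m := by
  have hlen : ((List.replicate L c ++ rest).length : Int) = (L : Int) + rest.length := by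
    push_cast [List.length_append, List.length_replicate]
    ring
  intro k
  induction k with
  | zero =>
    intro i m hk hi
    rw [runA_step _ n hn i m (by omega), if_neg (by omega),
        runA_step rest n hn (i - L) m (by omega), if_neg (by omega)]
  | succ k ih =>
    intro i m hk hi
    by_cases hle : i ≤ ((List.replicate L c ++ rest).length : Int)
    · have hslA : PySem.List.slice (List.replicate L c ++ rest) (some (i - n)) (some i)
          = PySem.List.slice rest (some (i - n - L)) (some (i - L)) :=
        slice_in_rest_int L c rest (i - n) i (by omega) (by omega) (by omega)
      by_cases hC : (PySem.Set.ofList (PySem.List.slice rest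
          (some (i - n - (L : Int))) (some (i - (L : Int))))).length = 1
      · have hCA : (PySem.Set.ofList (PySem.List.slice (List.replicate L c ++ rest)
            (some (i - n)) (some i))).length = 1 := by rw [hslA]; exact hC
        have hCB : (PySem.Set.ofList (PySem.List.slice rest
            (some (i - (L : Int) - n)) (some (i - (L : Int))))).length = 1 := by
          rw [show i - (L : Int) - n = i - n - L by ring]; exact hC
        rw [runA_step _ n hn i m (by omega), if_pos hle, if_pos hCA,
            runA_step rest n hn (i - L) m (by omega), if_pos (by omega), if_pos hCB,
            show i - (L : Int) + n = i + n - L by ring]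
        exact ih (i + n) (m + 1) (by omega) (by omega)
      · have hCA : ¬ (PySem.Set.ofList (PySem.List.slice (List.replicate L c ++ rest)
            (some (i - n)) (some i))).length = 1 := by rw [hslA]; exact hC
        have hCB : ¬ (PySem.Set.ofList (PySem.List.slice rest
            (some (i - (L : Int) - n)) (some (i - (L : Int))))).length = 1 := by
          rw [show i - (L : Int) - n = i - n - L by ring]; exact hC
        rw [runA_step _ n hn i m (by omega), if_pos hle, if_neg hCA,
            runA_step rest n hn (i - L) m (by omega), if_pos (by omega), if_neg hCB,
            show i - (L : Int) + 1 = i + 1 - L by ring]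
        exact ih (i + 1) m (by omega) (by omega)
    · rw [runA_step _ n hn i m (by omega), if_neg hle,
          runA_step rest n hn (i - L) m (by omega), if_neg (by omega)]

-- stepping through the boundary windows: no counts, until alignment with `rest`
theorem runA_boundary (L : Nat) (c d : Char) (rest : List Char) (n : Int) (hn : 1 ≤ n)
    (hL : 1 ≤ L) (hd : d ≠ c) :
    ∀ (k : Nat) (i m : Int),
      ((L : Int) + n - i).toNat ≤ k →
      (L : Int) < i → i ≤ (L : Int) + n → n ≤ i →
      runA (List.replicate L c ++ d :: rest) n i m = runA (d :: rest) n n m := by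
  have hlen : ((List.replicate L c ++ d :: rest).length : Int)
      = (L : Int) + ((d :: rest).length : Int) := by
    push_cast [List.length_append, List.length_replicate]
    ring
  have hlen2 : (((d :: rest).length : Nat) : Int) = (rest.length : Int) + 1 := by
    push_cast [List.length_cons]
    ring
  intro k
  induction k with
  | zero =>
    intro i m hk h1 h2 h3
    rw [runA_shift L c (d :: rest) n hn hL
          ((((List.replicate L c ++ d :: rest).length : Int) + n - i).toNat) i m le_rfl (by omega),
        show i - (L : Int) = n by omega]
  | succ k ih =>
    intro i m hk h1 h2 h3
    by_cases hend : i = (L : Int) + n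
    · rw [runA_shift L c (d :: rest) n hn hL
            ((((List.replicate L c ++ d :: rest).length : Int) + n - i).toNat) i m le_rfl (by omega),
          show i - (L : Int) = n by omega]
    · by_cases hle : i ≤ ((List.replicate L c ++ d :: rest).length : Int)
      · have hmx := slice_mixed_int L c d rest (i - n) i (by omega) hL (by omega) (by omega)
        have hC : ¬ (PySem.Set.ofList (PySem.List.slice (List.replicate L c ++ d :: rest)
            (some (i - n)) (some i))).length = 1 :=
          ofList_len_ne_one hmx.1 hmx.2 (Ne.symm hd)
        rw [runA_step _ n hn i m (by omega), if_pos hle, if_neg hC]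
        exact ih (i + 1) m (by omega) (by omega) (by omega) (by omega)
      · rw [runA_step _ n hn i m (by omega), if_neg hle,
            runA_step (d :: rest) n hn n m (by omega), if_neg (by omega)]

-- main equivalence, by strong induction on the length of the string
theorem runA_main_aux (n : Int) (hn : 1 ≤ n) :
    ∀ (k : Nat) (s : List Char), s.length ≤ k → runA s n n 0 = altGo n s := by
  intro k
  induction k with
  | zero =>
    intro s hs
    have hnil : s = [] := List.eq_nil_of_length_eq_zero (by omega)
    subst hnil
    rw [runA_step [] n hn n 0 (by omega), if_neg (by simp; omega)]
    simp [altGo]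
  | succ k ih =>
    intro s hs
    cases s with
    | nil =>
      rw [runA_step [] n hn n 0 (by omega), if_neg (by simp; omega)]
      simp [altGo]
    | cons c cs =>
      have htw : (c :: cs).takeWhile (fun x => x == c) = c :: cs.takeWhile (fun x => x == c) := by
        rw [List.takeWhile_cons_of_pos (by simp)]
      have hdw : (c :: cs).dropWhile (fun x => x == c) = cs.dropWhile (fun x => x == c) := by
        rw [List.dropWhile_cons_of_pos (by simp)]
      obtain ⟨L, hLdef⟩ : ∃ L, L = ((c :: cs).takeWhile (fun x => x == c)).length := ⟨_, rfl⟩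
      have hL1 : 1 ≤ L := by rw [hLdef, htw]; simp
      have hLeq : L = (cs.takeWhile (fun x => x == c)).length + 1 := by
        rw [hLdef, htw]; simp
      have hrep : (c :: cs).takeWhile (fun x => x == c) = List.replicate L c := by
        rw [hLdef]
        exact List.eq_replicate_of_mem (fun b hb => by
          simpa using List.mem_takeWhile_imp hb)
      have hsplit : c :: cs = List.replicate L c ++ cs.dropWhile (fun x => x == c) := by
        conv_lhs => rw [← List.takeWhile_append_dropWhile (p := fun x => x == c) (l := c :: cs)]
        rw [hrep, hdw]
      obtain ⟨N, hN1, hnN⟩ : ∃ N : Nat, 1 ≤ N ∧ n = (N : Int) := ⟨n.toNat, by omega, by omega⟩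
      obtain ⟨k0, hk0⟩ : ∃ k0, k0 = L / N := ⟨_, rfl⟩
      have hdm : L / N * N + L % N = L := Nat.div_add_mod' L N
      have hmod : L % N < N := Nat.mod_lt L (by omega)
      have hk0le : k0 * N ≤ L := by rw [hk0]; omega
      have hk0ub : L < k0 * N + N := by rw [hk0]; omega
      -- phase 1: within the run, one count every N positions
      have phase1 : ∀ j : Nat, j ≤ k0 →
          runA (c :: cs) n n 0 = runA (c :: cs) n ((j * N + N : Nat) : Int) (j : Int) := by
        intro j
        induction j with
        | zero =>
          intro _
          norm_num [hnN]
        | succ j ihj =>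
          intro hj
          rw [ihj (by omega)]
          have hstep : j * N + N ≤ L := by
            have h1 : (j + 1) * N ≤ k0 * N := Nat.mul_le_mul_right N hj
            have h3 : (j + 1) * N = j * N + N := by ring
            omega
          have hipos : (1 : Int) ≤ ((j * N + N : Nat) : Int) := by
            exact_mod_cast Nat.one_le_iff_ne_zero.mpr (by omega)
          have hlecond : ((j * N + N : Nat) : Int) ≤ ((c :: cs).length : Int) := by
            have hh : j * N + N ≤ (c :: cs).length := by
              rw [hsplit]
              simp only [List.length_append, List.length_replicate]
              omega
            exact_mod_cast hh
          have hcond : (PySem.Set.ofList (PySem.List.slice (c :: cs)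
              (some (((j * N + N : Nat) : Int) - n)) (some ((j * N + N : Nat) : Int)))).length = 1 := by
            rw [show (((j * N + N : Nat) : Int) - n) = ((j * N : Nat) : Int) by
                  rw [hnN]; push_cast; ring]
            rw [hsplit, slice_in_run L c _ (j * N) N hstep,
                show N = (N - 1) + 1 by omega, ofList_replicate_one]
            rfl
          rw [runA_step (c :: cs) n hn _ _ hipos, if_pos hlecond, if_pos hcond,
              show ((j * N + N : Nat) : Int) + n = (((j + 1) * N + N : Nat) : Int) by
                rw [hnN]; push_cast; ring,
              show ((j : Nat) : Int) + 1 = ((j + 1 : Nat) : Int) by push_cast; ring]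
      have hmain := phase1 k0 le_rfl
      have hipos0 : (1 : Int) ≤ ((k0 * N + N : Nat) : Int) := by
        exact_mod_cast Nat.one_le_iff_ne_zero.mpr (by omega)
      -- value of B
      have haltB : altGo n (c :: cs)
          = ((k0 : Nat) : Int) + altGo n (cs.dropWhile (fun x => x == c)) := by
        rw [altGo]
        congr 1
        rw [show ((cs.takeWhile (fun x => x == c)).length : Int) + 1 = ((L : Nat) : Int) by
              rw [hLeq]; push_cast; ring,
            hnN, PySem.Int.floordiv_natCast, hk0]
      cases hrr : cs.dropWhile (fun x => x == c) with
      | nil =>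
        have hlennil : (c :: cs).length = L := by rw [hsplit, hrr]; simp
        have hgt : ¬ ((k0 * N + N : Nat) : Int) ≤ ((c :: cs).length : Int) := by
          rw [hlennil]
          intro habs
          have : k0 * N + N ≤ L := by exact_mod_cast habs
          omega
        rw [hmain, haltB, hrr, runA_step (c :: cs) n hn _ _ hipos0, if_neg hgt]
        simp [altGo]
      | cons d rest' =>
        have hd : d ≠ c := by
          have h := List.head?_dropWhile_not (fun x => x == c) cs
          rw [hrr] at h
          simpa using h
        have hbig : (L : Int) < ((k0 * N + N : Nat) : Int) := by exact_mod_cast hk0ub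
        have hle' : ((k0 * N + N : Nat) : Int) ≤ (L : Int) + n := by
          rw [hnN]
          exact_mod_cast (by omega : k0 * N + N ≤ L + N)
        have hngeq : n ≤ ((k0 * N + N : Nat) : Int) := by
          rw [hnN]
          exact_mod_cast (by omega : N ≤ k0 * N + N)
        have hmain2 : runA (c :: cs) n ((k0 * N + N : Nat) : Int) ((k0 : Nat) : Int)
            = runA (d :: rest') n n ((k0 : Nat) : Int) := by
          conv_lhs => rw [hsplit, hrr]
          exact runA_boundary L c d rest' n hn hL1 hd
            (((L : Int) + n - ((k0 * N + N : Nat) : Int)).toNat) _ _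
            le_rfl hbig hle' hngeq
        have hIH : runA (d :: rest') n n 0 = altGo n (d :: rest') := by
          apply ih
          have h1 := List.length_dropWhile_le (fun x => x == c) cs
          rw [hrr] at h1
          simp only [List.length_cons] at hs h1 ⊢
          omega
        rw [hmain, hmain2, runA_acc, hIH, haltB, hrr]

theorem runA_main (n : Int) (hn : 1 ≤ n) :
    ∀ (s : List Char), runA s n n 0 = altGo n s := fun s =>
  runA_main_aux n hn s.length s le_rfl

-- ===== VERDICT (by name: the statement is the Claim_ definition above) =====
theorem sequences_of_len_n_spec : Claim_equal_sequences_of_len_n := by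
  intro s n _ hpre
  unfold Spec_sequences_of_len_n sequences_of_len_n sequences_of_len_n_alt
  exact runA_main n hpre s.toList
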